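-- pv_equiv track=rewrite | github.com/sontung/location-based-generative | plan_with_heuristic.py | hash_sg
-- ===== SOURCE A (Python) =====
-- def hash_sg(relationships, ob_names=('brown', 'purple', 'cyan', 'blue', 'red', 'green', 'gray')):
--     """
--     hash into unique ID
--     :param relationships: [['brown', 'left', 'purple'] , ['yellow', 'up', 'yellow']]
--     :param ob_names:
--     :return:
--     """
--     a_key = [0]*len(ob_names)*len(ob_names)
--     pred2id = {"none": 0, "left": 1, "up": 2}
--     predefined_objects1 = ob_names[:]
--     predefined_objects2 = ob_names[:]
--     pair2pred = {}
--     for rel in relationships: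
--         if rel[1] != "__in_image__":
--             pair2pred[(rel[0], rel[2])] = pred2id[rel[1]]
--
--     idx = 0
--     for ob1 in predefined_objects1:
--         for ob2 in predefined_objects2:
--             if (ob1, ob2) in pair2pred:
--                 a_key[idx] = pair2pred[(ob1, ob2)]
--             idx += 1
--     return tuple(a_key)
-- ===== SOURCE B (Python) =====
-- def hash_sg(relationships, ob_names=('brown', 'purple', 'cyan', 'blue', 'red', 'green', 'gray')):
--     pred2id = {"none": 0, "left": 1, "up": 2}
--     n = len(ob_names)
--     idx = {}
--     for i, name in enumerate(ob_names):
--         idx.setdefault(name, []).append(i)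
--     a_key = [0] * (n * n)
--     for rel in relationships:
--         if rel[1] == "__in_image__":
--             continue
--         v = pred2id[rel[1]]
--         for i in idx.get(rel[0], ()):
--             for j in idx.get(rel[2], ()):
--                 a_key[i * n + j] = v
--     return tuple(a_key)
-- ===== Notes on version B (the rewrite author's own statement) =====
-- stated objective: alternative
-- what changed: Replaces A's intermediate pair->pred dict plus nested scan over all n^2 name pairs with a name->indices map built once and a single direct-indexed pass over the relationships that writes each hit straight into the flat key.
import Mathlib
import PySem

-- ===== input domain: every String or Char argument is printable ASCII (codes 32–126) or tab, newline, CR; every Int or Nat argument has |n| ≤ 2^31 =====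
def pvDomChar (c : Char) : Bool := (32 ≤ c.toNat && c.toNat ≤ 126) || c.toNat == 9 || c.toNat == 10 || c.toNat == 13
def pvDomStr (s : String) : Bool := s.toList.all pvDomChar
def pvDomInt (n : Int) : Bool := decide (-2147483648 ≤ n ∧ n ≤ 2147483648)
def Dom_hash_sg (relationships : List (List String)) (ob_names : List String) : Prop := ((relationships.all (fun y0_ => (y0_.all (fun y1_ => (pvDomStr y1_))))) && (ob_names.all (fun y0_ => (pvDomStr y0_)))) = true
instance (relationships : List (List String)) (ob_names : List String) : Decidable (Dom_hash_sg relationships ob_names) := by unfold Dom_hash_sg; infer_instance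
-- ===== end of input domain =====

-- B replaces A's intermediate pair->pred dict plus nested scan over all name pairs with a
-- name->indices map built once and one direct-indexed pass over the relationships.

-- ===== PORT A =====
def hash_sg (relationships : List (List String)) (ob_names : List String) : List Int :=
  let a_key : List Int := List.replicate (ob_names.length * ob_names.length) (0 : Int)
  let pred2id : PySem.Dict String Int := PySem.Dict.ofList [("none", 0), ("left", 1), ("up", 2)]
  let predefined_objects1 := ob_names
  let predefined_objects2 := ob_names
  let pair2pred : PySem.Dict (String × String) Int :=
    relationships.foldl (fun d rel =>
      if PySem.List.pyGetD rel 1 "" ≠ "__in_image__" then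
        d.insert (PySem.List.pyGetD rel 0 "", PySem.List.pyGetD rel 2 "")
          (pred2id.getD (PySem.List.pyGetD rel 1 "") 0)
      else d) PySem.Dict.empty
  let st : List Int × Int :=
    predefined_objects1.foldl (fun st ob1 =>
      predefined_objects2.foldl (fun st ob2 =>
        let st' := if pair2pred.contains (ob1, ob2) then
            (PySem.List.pySetD st.1 st.2 (pair2pred.getD (ob1, ob2) 0), st.2)
          else st
        (st'.1, st'.2 + 1)) st) (a_key, (0 : Int))
  st.1

-- ===== PORT B =====
def hash_sg_alt (relationships : List (List String)) (ob_names : List String) : List Int :=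
  let pred2id : PySem.Dict String Int := PySem.Dict.ofList [("none", 0), ("left", 1), ("up", 2)]
  let n : Nat := ob_names.length
  let idx : PySem.Dict String (List Int) :=
    (PySem.List.enumerate ob_names 0).foldl
      (fun d p => d.modify p.2 [] (fun l => l ++ [p.1])) PySem.Dict.empty
  let a_key : List Int := List.replicate (n * n) (0 : Int)
  relationships.foldl (fun a rel =>
    if PySem.List.pyGetD rel 1 "" = "__in_image__" then a
    else
      let v := pred2id.getD (PySem.List.pyGetD rel 1 "") 0
      (idx.getD (PySem.List.pyGetD rel 0 "") []).foldl (fun a i =>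
        (idx.getD (PySem.List.pyGetD rel 2 "") []).foldl (fun a j =>
          PySem.List.pySetD a (i * (n : Int) + j) v) a) a) a_key

-- ===== PRECONDITION & SPEC =====
-- Pre_ excludes exactly the inputs on which Python A raises: a relationship shorter than the
-- indices it accesses (IndexError) or a predicate outside pred2id (KeyError).
def Pre_hash_sg (relationships : List (List String)) (ob_names : List String) : Prop :=
  ∀ rel ∈ relationships,
    (2 ≤ rel.length ∧ rel.getD 1 "" = "__in_image__") ∨
    (3 ≤ rel.length ∧ rel.getD 1 "" ∈ (["none", "left", "up"] : List String))
instance (relationships : List (List String)) (ob_names : List String) : Decidable (Pre_hash_sg relationships ob_names) := by unfold Pre_hash_sg; infer_instance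

def pvWitness_hash_sg : List (List String) × List String :=
  ([["brown", "left", "purple"], ["cyan", "__in_image__"], ["purple", "up", "brown"]],
   ["brown", "purple", "cyan"])

def Spec_hash_sg (relationships : List (List String)) (ob_names : List String) (out : List Int) : Prop := out = hash_sg_alt relationships ob_names
instance (relationships : List (List String)) (ob_names : List String) (out : List Int) : Decidable (Spec_hash_sg relationships ob_names out) := by unfold Spec_hash_sg; infer_instance

-- ===== CLAIM (what is proved, stated in full; the proofs are below) =====
def Claim_equal_hash_sg : Prop := ∀ (relationships : List (List String)) (ob_names : List String), Dom_hash_sg relationships ob_names → Pre_hash_sg relationships ob_names → Spec_hash_sg relationships ob_names (hash_sg relationships ob_names)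

-- ===== LEMMAS AND PROOFS =====

-- ---- shared vocabulary ----
def pvPred2id : PySem.Dict String Int := PySem.Dict.ofList [("none", 0), ("left", 1), ("up", 2)]

-- one relationship's effect on the logical pair -> predicate-id dict (A's first loop / B's writes)
def pvDictStep (d : PySem.Dict (String × String) Int) (rel : List String) : PySem.Dict (String × String) Int :=
  if PySem.List.pyGetD rel 1 "" ≠ "__in_image__" then
    d.insert (PySem.List.pyGetD rel 0 "", PySem.List.pyGetD rel 2 "")
      (pvPred2id.getD (PySem.List.pyGetD rel 1 "") 0)
  else d

-- the grid read off a dict, row-major over all name pairs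
def pvGrid (d : PySem.Dict (String × String) Int) (obs1 obs2 : List String) : List Int :=
  obs1.flatMap (fun o1 => obs2.map (fun o2 => d.getD (o1, o2) 0))

theorem pvGrid_cons (d : PySem.Dict (String × String) Int) (o : String) (obs1 obs2 : List String) :
    pvGrid d (o :: obs1) obs2 = obs2.map (fun o2 => d.getD (o, o2) 0) ++ pvGrid d obs1 obs2 := by
  simp [pvGrid]

theorem pvGrid_length (d : PySem.Dict (String × String) Int) (obs1 obs2 : List String) :
    (pvGrid d obs1 obs2).length = obs1.length * obs2.length := by
  induction obs1 with
  | nil => simp [pvGrid]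
  | cons o t ih => simp [pvGrid_cons, ih, Nat.succ_mul]; omega

theorem pvGrid_empty (obs1 obs2 : List String) :
    pvGrid PySem.Dict.empty obs1 obs2 = List.replicate (obs1.length * obs2.length) (0 : Int) := by
  induction obs1 with
  | nil => simp [pvGrid]
  | cons o t ih =>
    rw [pvGrid_cons, ih]
    have h1 : (o :: t).length * obs2.length = obs2.length + t.length * obs2.length := by
      simp [Nat.succ_mul]; omega
    rw [h1, List.replicate_add]
    congr 1
    simp [PySem.Dict.getD_empty]

theorem pvGrid_getElem? (d : PySem.Dict (String × String) Int) (obs2 : List String) :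
    ∀ (obs1 : List String) (i j : Nat), (hi : i < obs1.length) → (hj : j < obs2.length) →
      (pvGrid d obs1 obs2)[i * obs2.length + j]? = some (d.getD (obs1[i], obs2[j]) 0) := by
  intro obs1
  induction obs1 with
  | nil => intro i j hi; simp at hi
  | cons o t ih =>
    intro i j hi hj
    rw [pvGrid_cons]
    match i with
    | 0 =>
      rw [List.getElem?_append_left (by simpa using hj)]
      simp [List.getElem?_map, List.getElem?_eq_getElem hj]
    | (i' + 1) =>
      have hlen : (List.map (fun o2 => d.getD (o, o2) 0) obs2).length ≤ (i' + 1) * obs2.length + j := by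
        simp [Nat.succ_mul]; omega
      rw [List.getElem?_append_right hlen]
      have harith : (i' + 1) * obs2.length + j - (List.map (fun o2 => d.getD (o, o2) 0) obs2).length
          = i' * obs2.length + j := by simp [Nat.succ_mul]; omega
      rw [harith, ih i' j (by simpa using hi) hj]
      simp

-- ---- A side ----
def pvInnerStep (f : PySem.Dict (String × String) Int) (ob1 : String) (st : List Int × Int) (ob2 : String) : List Int × Int :=
  let st' := if f.contains (ob1, ob2) then
      (PySem.List.pySetD st.1 st.2 (f.getD (ob1, ob2) 0), st.2)
    else st
  (st'.1, st'.2 + 1)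

theorem pvA_inner (f : PySem.Dict (String × String) Int) (ob1 : String) :
    ∀ (obs2 : List String) (p : List Int) (z : Nat),
      obs2.foldl (pvInnerStep f ob1) (p ++ List.replicate (obs2.length + z) (0 : Int), (p.length : Int))
        = (p ++ obs2.map (fun ob2 => f.getD (ob1, ob2) 0) ++ List.replicate z (0 : Int),
           (p.length : Int) + obs2.length) := by
  intro obs2
  induction obs2 with
  | nil => intro p z; simp
  | cons o t ih =>
    intro p z
    have h1 : (o :: t).length + z = (t.length + z) + 1 := by simp; omega
    rw [h1, List.replicate_succ, List.foldl_cons]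
    have hstep : pvInnerStep f ob1 (p ++ 0 :: List.replicate (t.length + z) (0 : Int), (p.length : Int)) o
        = ((p ++ [f.getD (ob1, o) 0]) ++ List.replicate (t.length + z) (0 : Int), ((p ++ [f.getD (ob1, o) 0]).length : Int)) := by
      unfold pvInnerStep
      by_cases hc : f.contains (ob1, o) = true
      · simp only [hc, if_true]
        rw [PySem.List.pySetD_natCast, List.set_append_right _ _ (le_refl _)]
        simp
      · simp only [Bool.not_eq_true] at hc
        simp [hc, PySem.Dict.getD_of_not_contains f 0 hc]
    rw [hstep, ih]
    simp [List.append_assoc]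
    ring

theorem pvA_outer (f : PySem.Dict (String × String) Int) (obs2 : List String) :
    ∀ (obs1 : List String) (p : List Int),
      obs1.foldl (fun st ob1 => obs2.foldl (pvInnerStep f ob1) st)
          (p ++ List.replicate (obs1.length * obs2.length) (0 : Int), (p.length : Int))
        = (p ++ pvGrid f obs1 obs2, (p.length : Int) + obs1.length * obs2.length) := by
  intro obs1
  induction obs1 with
  | nil => intro p; simp [pvGrid]
  | cons o t ih =>
    intro p
    have h1 : (o :: t).length * obs2.length = obs2.length + t.length * obs2.length := by
      simp [Nat.succ_mul]; omega
    rw [h1, List.foldl_cons]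
    rw [pvA_inner f o obs2 p (t.length * obs2.length)]
    have h3 : ((p.length : Int) + obs2.length) = (((p ++ List.map (fun ob2 => f.getD (o, ob2) 0) obs2).length : Int)) := by
      simp
    rw [h3, ih]
    rw [pvGrid_cons]
    refine Prod.ext ?_ ?_
    · simp [List.append_assoc]
    · simp; ring

theorem pvA_eq (relationships : List (List String)) (ob_names : List String) :
    hash_sg relationships ob_names
      = pvGrid (relationships.foldl pvDictStep PySem.Dict.empty) ob_names ob_names := by
  have hdef : hash_sg relationships ob_names
      = (ob_names.foldl (fun st ob1 => ob_names.foldl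
            (pvInnerStep (relationships.foldl pvDictStep PySem.Dict.empty) ob1) st)
          (([] : List Int) ++ List.replicate (ob_names.length * ob_names.length) (0 : Int),
           ((([] : List Int).length : Int)))).1 := rfl
  rw [hdef, pvA_outer]
  simp

-- ---- B side ----
def pvIdx (obs : List String) : PySem.Dict String (List Int) :=
  (PySem.List.enumerate obs 0).foldl
    (fun d p => d.modify p.2 [] (fun l => l ++ [p.1])) PySem.Dict.empty

theorem pvIdx_getD (obs : List String) (x : String) :
    (pvIdx obs).getD x []
      = ((PySem.List.enumerate obs 0).filter (fun p => p.2 == x)).map (fun p => p.1) := by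
  unfold pvIdx
  have h : (PySem.List.enumerate obs 0).foldl
      (fun d p => d.modify p.2 [] (fun l => l ++ [p.1])) PySem.Dict.empty
    = (((PySem.List.enumerate obs 0).map (fun p => (p.2, p.1))).foldl
      (fun d q => d.modify q.1 [] (fun l => l ++ [q.2])) PySem.Dict.empty) := by
    rw [List.foldl_map]
  rw [h, PySem.Dict.getD_foldl_modify_append]
  simp [List.filter_map, Function.comp_def]

theorem pvMem_idx (obs : List String) (x : String) (i : Int) :
    i ∈ (pvIdx obs).getD x []
      ↔ ∃ (k : Nat) (_ : k < obs.length), obs[k] = x ∧ i = (k : Int) := by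
  rw [pvIdx_getD]
  simp only [List.mem_map, List.mem_filter, PySem.List.mem_enumerate_iff]
  constructor
  · rintro ⟨p, ⟨⟨k, hk, rfl⟩, hx⟩, rfl⟩
    exact ⟨k, hk, by simpa using hx, by simp⟩
  · rintro ⟨k, hk, hx, rfl⟩
    exact ⟨((k : Int), obs[k]), ⟨⟨k, hk, by simp⟩, by simpa using hx⟩, rfl⟩

theorem pvSetFold_length (v : Int) :
    ∀ (L : List Int) (a : List Int),
      (L.foldl (fun a i => PySem.List.pySetD a i v) a).length = a.length := by
  intro L
  induction L with
  | nil => intro a; rfl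
  | cons i L ih => intro a; rw [List.foldl_cons, ih, PySem.List.length_pySetD]

theorem pvSetFold_getElem (v : Int) :
    ∀ (L : List Int) (a : List Int) (m : Nat),
      (∀ p ∈ L, ∃ t : Nat, t < a.length ∧ p = (t : Int)) → m < a.length →
      PySem.List.pyGetD (L.foldl (fun a i => PySem.List.pySetD a i v) a) (m : Int) 0
        = if (m : Int) ∈ L then v else PySem.List.pyGetD a (m : Int) 0 := by
  intro L
  induction L with
  | nil => intro a m _ _; simp
  | cons i L ih =>
    intro a m hL hm
    obtain ⟨t, ht, rfl⟩ := hL i (by simp)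
    rw [List.foldl_cons]
    have hL' : ∀ p ∈ L, ∃ t' : Nat, t' < (PySem.List.pySetD a (t : Int) v).length ∧ p = (t' : Int) := by
      intro p hp
      obtain ⟨t', ht', rfl⟩ := hL p (by simp [hp])
      exact ⟨t', by rwa [PySem.List.length_pySetD], rfl⟩
    rw [ih _ m hL' (by rwa [PySem.List.length_pySetD])]
    by_cases hmem : (m : Int) ∈ L
    · simp [hmem]
    · rw [if_neg hmem]
      rw [PySem.List.pyGetD_pySetD_natCast a t m v 0 ht]
      by_cases hmt : m = t
      · simp [hmt]
      · have : ((m : Int)) ≠ ((t : Int)) := by exact_mod_cast hmt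
        simp [hmem, hmt, this]

theorem pvDoubleFold_eq_flat (v : Int) (n : Nat) (P Q : List Int) (a : List Int) :
    P.foldl (fun a i => Q.foldl (fun a j => PySem.List.pySetD a (i * (n : Int) + j) v) a) a
      = (P.flatMap (fun i => Q.map (fun j => i * (n : Int) + j))).foldl
          (fun a m => PySem.List.pySetD a m v) a := by
  rw [List.flatMap_def, List.foldl_flatten, List.foldl_map]
  simp [List.foldl_map]

theorem pvGetElem?_eq_pyGetD (l : List Int) (k : Nat) (h : k < l.length) :
    l[k]? = some (PySem.List.pyGetD l (k : Int) 0) := by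
  rw [PySem.List.pyGetD_natCast]
  simp [List.getD_eq_getElem?_getD, List.getElem?_eq_getElem h]

theorem pvWrite_grid (d : PySem.Dict (String × String) Int) (obs : List String) (x y : String) (v : Int) :
    ((pvIdx obs).getD x []).foldl
      (fun a i => ((pvIdx obs).getD y []).foldl
        (fun a j => PySem.List.pySetD a (i * (obs.length : Int) + j) v) a)
      (pvGrid d obs obs)
    = pvGrid (d.insert (x, y) v) obs obs := by
  rw [pvDoubleFold_eq_flat]
  set n := obs.length with hn
  set L := ((pvIdx obs).getD x []).flatMap
      (fun i => ((pvIdx obs).getD y []).map (fun j => i * (n : Int) + j)) with hL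
  have hmem : ∀ p : Int, p ∈ L ↔ ∃ (ki kj : Nat) (_ : ki < n) (_ : kj < n),
      obs[ki] = x ∧ obs[kj] = y ∧ p = ((ki * n + kj : Nat) : Int) := by
    intro p
    simp only [hL, List.mem_flatMap, List.mem_map, pvMem_idx, hn]
    constructor
    · rintro ⟨i, ⟨ki, hki, hxi, rfl⟩, j, ⟨kj, hkj, hyj, rfl⟩, rfl⟩
      exact ⟨ki, kj, hki, hkj, hxi, hyj, by push_cast; ring⟩
    · rintro ⟨ki, kj, hki, hkj, hxi, hyj, rfl⟩
      exact ⟨(ki : Int), ⟨ki, hki, hxi, rfl⟩, (kj : Int), ⟨kj, hkj, hyj, rfl⟩, by push_cast; ring⟩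
  have hbound : ∀ p ∈ L, ∃ t : Nat, t < (pvGrid d obs obs).length ∧ p = (t : Int) := by
    intro p hp
    obtain ⟨ki, kj, hki, hkj, _, _, rfl⟩ := (hmem p).1 hp
    refine ⟨ki * n + kj, ?_, rfl⟩
    rw [pvGrid_length, ← hn]
    calc ki * n + kj < ki * n + n := by omega
      _ = (ki + 1) * n := by ring
      _ ≤ n * n := Nat.mul_le_mul_right n hki
  apply List.ext_getElem?
  intro k
  have hlenL : ((L.foldl (fun a m => PySem.List.pySetD a m v) (pvGrid d obs obs))).length = n * n := by
    rw [pvSetFold_length, pvGrid_length]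
  have hlenR : (pvGrid (d.insert (x, y) v) obs obs).length = n * n := by
    rw [pvGrid_length]
  by_cases hk : k < n * n
  · have hnpos : 0 < n := by
      rcases Nat.eq_zero_or_pos n with h0 | h0
      · rw [h0] at hk; omega
      · exact h0
    have hi0 : k / n < n := Nat.div_lt_iff_lt_mul hnpos |>.2 hk
    have hj0 : k % n < n := Nat.mod_lt _ hnpos
    have hdecomp : (k / n) * n + k % n = k := by
      rw [Nat.mul_comm]; exact Nat.div_add_mod k n
    rw [pvGetElem?_eq_pyGetD _ k (by omega), pvGetElem?_eq_pyGetD _ k (by omega)]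
    rw [pvSetFold_getElem v L (pvGrid d obs obs) k hbound (by rw [pvGrid_length]; exact hk)]
    have hgetL : PySem.List.pyGetD (pvGrid d obs obs) (k : Int) 0
        = d.getD (obs[k / n]'hi0, obs[k % n]'hj0) 0 := by
      have h := pvGrid_getElem? d obs obs (k / n) (k % n) hi0 hj0
      rw [hdecomp] at h
      rw [PySem.List.pyGetD_natCast, List.getD_eq_getElem?_getD, h]
      rfl
    have hgetR : PySem.List.pyGetD (pvGrid (d.insert (x, y) v) obs obs) (k : Int) 0
        = (d.insert (x, y) v).getD (obs[k / n]'hi0, obs[k % n]'hj0) 0 := by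
      have h := pvGrid_getElem? (d.insert (x, y) v) obs obs (k / n) (k % n) hi0 hj0
      rw [hdecomp] at h
      rw [PySem.List.pyGetD_natCast, List.getD_eq_getElem?_getD, h]
      rfl
    have hmemk : ((k : Int) ∈ L) ↔ (obs[k / n]'hi0 = x ∧ obs[k % n]'hj0 = y) := by
      rw [hmem]
      constructor
      · rintro ⟨ki, kj, hki, hkj, hxi, hyj, hexp⟩
        have hkeq : ki * n + kj = k := by exact_mod_cast hexp.symm
        have hdiv : ki = k / n := by
          rw [← hkeq, Nat.add_comm, Nat.add_mul_div_right _ _ hnpos, Nat.div_eq_of_lt hkj]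
          omega
        have hmod : kj = k % n := by
          rw [← hkeq, Nat.add_comm, Nat.add_mul_mod_self_right, Nat.mod_eq_of_lt hkj]
        subst hdiv; subst hmod
        exact ⟨hxi, hyj⟩
      · rintro ⟨hxi, hyj⟩
        exact ⟨k / n, k % n, hi0, hj0, hxi, hyj, by exact_mod_cast hdecomp.symm⟩
    rw [hgetL, hgetR, PySem.Dict.getD_insert]
    by_cases hcase : obs[k / n]'hi0 = x ∧ obs[k % n]'hj0 = y
    · rw [if_pos ((hmemk).2 hcase), if_pos (by simp [hcase.1, hcase.2])]
    · rw [if_neg (fun h => hcase ((hmemk).1 h)), if_neg (by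
        intro h
        rw [Prod.mk.injEq] at h
        exact hcase h)]
  · rw [List.getElem?_eq_none (by omega), List.getElem?_eq_none (by omega)]

def pvWriteStep (obs : List String) (a : List Int) (rel : List String) : List Int :=
  if PySem.List.pyGetD rel 1 "" = "__in_image__" then a
  else
    ((pvIdx obs).getD (PySem.List.pyGetD rel 0 "") []).foldl (fun a i =>
      ((pvIdx obs).getD (PySem.List.pyGetD rel 2 "") []).foldl (fun a j =>
        PySem.List.pySetD a (i * (obs.length : Int) + j)
          (pvPred2id.getD (PySem.List.pyGetD rel 1 "") 0)) a) a

theorem pvB_fold (obs : List String) :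
    ∀ (rels : List (List String)) (d : PySem.Dict (String × String) Int),
      rels.foldl (pvWriteStep obs) (pvGrid d obs obs)
        = pvGrid (rels.foldl pvDictStep d) obs obs := by
  intro rels
  induction rels with
  | nil => intro d; rfl
  | cons r t ih =>
    intro d
    rw [List.foldl_cons, List.foldl_cons]
    by_cases h : PySem.List.pyGetD r 1 "" = "__in_image__"
    · rw [show pvWriteStep obs (pvGrid d obs obs) r = pvGrid d obs obs from by
          simp [pvWriteStep, h],
        show pvDictStep d r = d from by simp [pvDictStep, h], ih]
    · have h1 : pvWriteStep obs (pvGrid d obs obs) r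
          = pvGrid (d.insert (PySem.List.pyGetD r 0 "", PySem.List.pyGetD r 2 "")
              (pvPred2id.getD (PySem.List.pyGetD r 1 "") 0)) obs obs := by
        rw [pvWriteStep, if_neg h]
        exact pvWrite_grid _ obs _ _ _
      have h2 : pvDictStep d r
          = d.insert (PySem.List.pyGetD r 0 "", PySem.List.pyGetD r 2 "")
              (pvPred2id.getD (PySem.List.pyGetD r 1 "") 0) := by
        rw [pvDictStep, if_pos h]
      rw [h1, h2, ih]

theorem pvB_eq (relationships : List (List String)) (ob_names : List String) :
    hash_sg_alt relationships ob_names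
      = pvGrid (relationships.foldl pvDictStep PySem.Dict.empty) ob_names ob_names := by
  have hdef : hash_sg_alt relationships ob_names
      = relationships.foldl (pvWriteStep ob_names)
          (List.replicate (ob_names.length * ob_names.length) (0 : Int)) := rfl
  rw [hdef, ← pvGrid_empty, pvB_fold]

-- ===== VERDICT (by name: the statement is the Claim_ definition above) =====
theorem hash_sg_spec : Claim_equal_hash_sg := by
  unfold Claim_equal_hash_sg
  intro relationships ob_names _ _
  unfold Spec_hash_sg
  rw [pvA_eq, pvB_eq]
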